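-- pv_equiv track=rewrite | github.com/NiklasWeber27/SWP-Python-Weber | Pokersimulator.py | isdrilling
-- ===== SOURCE A (Python) =====
-- def isdrilling(numbers):
--     value_count = {}
--     for n in numbers:
--         if n in value_count:
--             value_count[n] += 1
--         else:
--             value_count[n] = 1
--     for count in value_count.values():
--         if count == 3:
--             return True
--     return False
-- ===== SOURCE B (Python) =====
-- def isdrilling(numbers):
--     s = sorted(numbers)
--     if not s:
--         return False
--     cur, run = s[0], 1
--     for x in s[1:]:
--         if x == cur:
--             run += 1
--         else:
--             if run == 3:
--                 return True
--             cur, run = x, 1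
--     return run == 3
-- ===== Notes on version B (the rewrite author's own statement) =====
-- stated objective: alternative
-- what changed: Replaces the frequency dictionary with sort-then-scan: B sorts the list and counts consecutive equal runs in one pass, returning True when a finished run has length exactly 3.
import Mathlib
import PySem

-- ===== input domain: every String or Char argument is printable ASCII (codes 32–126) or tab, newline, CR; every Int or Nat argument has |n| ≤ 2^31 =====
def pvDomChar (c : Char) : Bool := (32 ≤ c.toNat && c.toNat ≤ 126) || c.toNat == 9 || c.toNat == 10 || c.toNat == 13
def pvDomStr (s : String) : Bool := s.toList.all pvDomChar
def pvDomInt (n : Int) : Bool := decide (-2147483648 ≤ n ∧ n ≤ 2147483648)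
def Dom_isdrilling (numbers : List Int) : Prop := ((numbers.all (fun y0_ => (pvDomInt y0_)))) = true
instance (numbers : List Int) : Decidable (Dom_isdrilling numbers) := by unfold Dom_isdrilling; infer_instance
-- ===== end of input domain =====

-- B replaces A's frequency dictionary with sort-then-scan over consecutive equal runs (alternative decomposition, same result).

-- ===== PORT A =====
-- literal transliteration: build the count dict, then scan its values for 3 (early return → any)
def isdrilling (numbers : List Int) : Bool :=
  let value_count := numbers.foldl
    (fun d n => if d.contains n then d.insert n (d.getD n 0 + 1) else d.insert n 1)
    (PySem.Dict.empty : PySem.Dict Int Int)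
  value_count.values.any (fun count => count == 3)

-- ===== PORT B =====
-- the for-loop over s[1:] carrying (cur, run); run == 3 checked when a run ends and at the end
def drillScan (cur : Int) (run : Int) : List Int → Bool
  | [] => run == 3
  | x :: rest =>
      if x == cur then drillScan cur (run + 1) rest
      else if run == 3 then true
      else drillScan x 1 rest

def isdrilling_alt (numbers : List Int) : Bool :=
  match PySem.List.sorted numbers (fun x => x) false with
  | [] => false
  | x :: rest => drillScan x 1 rest

-- ===== PRECONDITION & SPEC =====
def Spec_isdrilling (numbers : List Int) (out : Bool) : Prop := out = isdrilling_alt numbers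
instance (numbers : List Int) (out : Bool) : Decidable (Spec_isdrilling numbers out) := by unfold Spec_isdrilling; infer_instance

-- ===== CLAIM (what is proved, stated in full; the proofs are below) =====
def Claim_equal_isdrilling : Prop := ∀ (numbers : List Int), Dom_isdrilling numbers → Spec_isdrilling numbers (isdrilling numbers)

-- ===== LEMMAS AND PROOFS =====

-- A's step function is the Counter step: when the key is fresh, getD is 0
theorem isdrilling_step_eq :
    (fun (d : PySem.Dict Int Int) n => if d.contains n then d.insert n (d.getD n 0 + 1) else d.insert n 1)
      = (fun d x => d.insert x (d.getD x 0 + 1)) := by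
  funext d n
  by_cases h : d.contains n = true
  · simp [h]
  · simp only [Bool.not_eq_true] at h
    simp [h, PySem.Dict.getD_of_not_contains d 0 h]

-- A returns true iff some value occurs exactly three times
theorem isdrilling_iff (numbers : List Int) :
    isdrilling numbers = true ↔ ∃ v ∈ numbers, numbers.count v = 3 := by
  simp only [isdrilling, isdrilling_step_eq,
    PySem.Dict.foldl_insert_getD_add_one_eq_counter]
  rw [PySem.Dict.values_eq_map_keys _ (PySem.Dict.nodup_keys_counter numbers) 0,
      PySem.Dict.keys_counter]
  simp only [List.any_map, List.any_eq_true, PySem.Set.mem_ofList, PySem.Dict.getD_counter,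
    Function.comp, beq_iff_eq]
  constructor
  · rintro ⟨v, hv, h⟩; exact ⟨v, hv, by exact_mod_cast h⟩
  · rintro ⟨v, hv, h⟩; exact ⟨v, hv, by exact_mod_cast h⟩

-- run-scan invariant on a sorted tail
theorem drillScan_iff (rest : List Int) : ∀ (cur run : Int),
    (cur :: rest).Pairwise (· ≤ ·) →
    (drillScan cur run rest = true ↔
      run + rest.count cur = 3 ∨ ∃ v ∈ rest, v ≠ cur ∧ rest.count v = 3) := by
  induction rest with
  | nil =>
      intro cur run _
      simp [drillScan]
  | cons x rest ih =>
      intro cur run hp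
      have hp' : (x :: rest).Pairwise (· ≤ ·) := hp.sublist (List.sublist_cons_self _ _)
      have hcx : cur ≤ x := (List.pairwise_cons.1 hp).1 x (List.mem_cons_self ..)
      by_cases hx : x = cur
      · subst hx
        rw [show drillScan x run (x :: rest) = drillScan x (run + 1) rest by simp [drillScan]]
        rw [ih x (run + 1) hp']
        simp only [List.count_cons, List.mem_cons]
        constructor
        · rintro (h | ⟨v, hv, hne, hc⟩)
          · left; simp; omega
          · have hxv : ¬ x = v := fun h => hne h.symm
            right; exact ⟨v, Or.inr hv, hne, by simp [hxv, hc]⟩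
        · rintro (h | ⟨v, hv, hne, hc⟩)
          · left; simp at h; omega
          · rcases hv with rfl | hv
            · exact absurd rfl hne
            · have hxv : ¬ x = v := fun h => hne h.symm
              exact Or.inr ⟨v, hv, hne, by simpa [hxv] using hc⟩
      · -- x ≠ cur: cur < x ≤ every later element, so cur does not occur again
        have hlt : cur < x := lt_of_le_of_ne hcx (fun h => hx h.symm)
        have hrest : ∀ v ∈ rest, x ≤ v := (List.pairwise_cons.1 hp').1
        have hcount0 : rest.count cur = 0 := by
          rw [List.count_eq_zero]
          intro hmem
          exact absurd (hrest cur hmem) (by omega)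
        have step : drillScan cur run (x :: rest)
            = if run == 3 then true else drillScan x 1 rest := by
          simp [drillScan, hx]
        rw [step]
        by_cases hr : run = 3
        · simp [hr, List.count_cons, hx, hcount0]
        · have hr' : (run == 3) = false := by simp [hr]
          rw [hr']
          simp only [Bool.false_eq_true, if_false]
          rw [ih x 1 hp']
          simp only [List.count_cons, List.mem_cons]
          constructor
          · rintro (h | ⟨v, hv, hne, hc⟩)
            · right; exact ⟨x, Or.inl rfl, fun h' => hx h', by simp; omega⟩
            · have hvc : v ≠ cur := by
                have := hrest v hv; omega
              have hxv : ¬ x = v := fun h => hne h.symm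
              right; exact ⟨v, Or.inr hv, hvc, by simp [hxv, hc]⟩
          · rintro (h | ⟨v, hv, hne, hc⟩)
            · simp [hx, hcount0] at h; omega
            · rcases hv with rfl | hv
              · left; simp at hc; omega
              · by_cases hvx : v = x
                · subst hvx; left; simp at hc; omega
                · have hxv : ¬ x = v := fun h => hvx h.symm
                  right; exact ⟨v, hv, hvx, by simpa [hxv] using hc⟩

-- B returns true iff some value occurs exactly three times
theorem isdrilling_alt_iff (numbers : List Int) :
    isdrilling_alt numbers = true ↔ ∃ v ∈ numbers, numbers.count v = 3 := by
  unfold isdrilling_alt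
  have hperm : (PySem.List.sorted numbers (fun x => x) false).Perm numbers :=
    PySem.List.sorted_perm numbers _ _
  have hpw : (PySem.List.sorted numbers (fun x => x) false).Pairwise
      (fun a b => (fun x => x) a ≤ (fun x => x) b) :=
    PySem.List.sorted_pairwise numbers _
  rcases hs : PySem.List.sorted numbers (fun x => x) false with _ | ⟨x, rest⟩
  · have : numbers = [] := (List.Perm.nil_eq (hs ▸ hperm)).symm
    subst this
    simp
  · rw [hs] at hperm hpw
    have hkey := drillScan_iff rest x 1 (by simpa using hpw)
    rw [hkey]
    have hc : ∀ v : Int, numbers.count v = (x :: rest).count v :=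
      fun v => (hperm.count_eq v).symm
    have hm : ∀ v : Int, v ∈ numbers ↔ v ∈ x :: rest := fun v => hperm.mem_iff.symm
    constructor
    · rintro (h | ⟨v, hv, hne, hcv⟩)
      · exact ⟨x, (hm x).2 (List.mem_cons_self ..), by rw [hc]; simp; omega⟩
      · have hxv : ¬ x = v := fun h => hne h.symm
        exact ⟨v, (hm v).2 (List.mem_cons.2 (Or.inr hv)), by rw [hc]; simp [hxv, hcv]⟩
    · rintro ⟨v, hv, hcv⟩
      rw [hc v] at hcv
      by_cases hvx : v = x
      · subst hvx; left; simp at hcv ⊢; omega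
      · right
        refine ⟨v, ?_, hvx, ?_⟩
        · rcases List.mem_cons.1 ((hm v).1 hv) with h | h
          · exact absurd h hvx
          · exact h
        · have hxv : ¬ x = v := fun h => hvx h.symm
          simpa [hxv] using hcv

-- ===== VERDICT (by name: the statement is the Claim_ definition above) =====
theorem isdrilling_spec : Claim_equal_isdrilling := by
  intro numbers _
  unfold Spec_isdrilling
  rw [Bool.eq_iff_iff, isdrilling_iff, isdrilling_alt_iff]
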